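-- pv_equiv track=rewrite | github.com/xtknight/rich-morphological-tagger | model_grade.py | as_word_level
-- ===== SOURCE A (Python) =====
-- def as_word_level(chunks, force_segmod_keep=False, force_mod_keep=False):
--     if force_segmod_keep:
--         assert not force_mod_keep, 'mutually exclusive options: force_segmod_keep already does force_mod_keep'
--
--     words = []
--
--     current_word = []
--     for c_idx, c in enumerate(sorted(chunks)): # make sure to traverse in order
--         if c[1].rsplit('/', 1)[0] == '_':   # '_' is reserved
--             if len(current_word) > 0:
--                 words.append(current_word)
--                 current_word = []
--         else:
--             if force_segmod_keep:
--                 morph, tag = c[1].rsplit('/', 1)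
--
--                 if len(current_word) == 0:
--                     current_word.append((len(current_word), '/'.join((morph, 'B-KEEP'))))
--                 else:
--                     current_word.append((len(current_word), '/'.join((morph, 'I-KEEP'))))
--             elif force_mod_keep:
--                 morph, tag = c[1].rsplit('/', 1)
--                 if tag == 'NOOP':
--                     if len(current_word) == 0:
--                         # if it was a NOOP action, make it a KEEP depending
--                         # on where we are in the word
--                         tag = 'B-KEEP'
--                     else:
--                         tag = 'I-KEEP'
--                 elif tag == 'B-KEEP' or tag == 'I-KEEP':
--                     # no change
--                     pass
--                 else:
--                     # mod action that could contain multiple B/I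
--                     # in our case, just force depending on word position
--                     if len(current_word) == 0:
--                         # if it was a NOOP action, make it a KEEP depending
--                         # on where we are in the word
--                         tag = 'B-KEEP'
--                     else:
--                         tag = 'I-KEEP'
--
--                 current_word.append((len(current_word), '/'.join((morph, tag))))
--             else:
--                 current_word.append((len(current_word), c[1]))
--
--     if len(current_word) > 0:
--         words.append(current_word)
--
--     return words
-- ===== SOURCE B (Python) =====
-- def as_word_level(chunks, force_segmod_keep=False, force_mod_keep=False):
--     if force_segmod_keep:
--         assert not force_mod_keep, 'mutually exclusive options: force_segmod_keep already does force_mod_keep'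
--
--     # pass 1: partition sorted chunks into maximal runs of non-'_' chunks
--     groups = []
--     cur = []
--     for c in sorted(chunks):
--         if c[1].rsplit('/', 1)[0] == '_':
--             if cur:
--                 groups.append(cur)
--                 cur = []
--         else:
--             cur.append(c)
--     if cur:
--         groups.append(cur)
--
--     # pass 2: re-index each word and rewrite its tag
--     def transform(i, s):
--         if force_segmod_keep:
--             morph, tag = s.rsplit('/', 1)
--             return morph + '/' + ('B-KEEP' if i == 0 else 'I-KEEP')
--         if force_mod_keep:
--             morph, tag = s.rsplit('/', 1)
--             if tag == 'B-KEEP' or tag == 'I-KEEP':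
--                 return morph + '/' + tag
--             return morph + '/' + ('B-KEEP' if i == 0 else 'I-KEEP')
--         return s
--
--     return [[(i, transform(i, c[1])) for i, c in enumerate(g)] for g in groups]
-- ===== Notes on version B (the rewrite author's own statement) =====
-- stated objective: alternative
-- what changed: Replaces A's single stateful loop (which transforms tags while building the current word) by two passes: first partition sorted(chunks) into words at '_' separators, then re-index and rewrite each word's tags with enumerate; Pre_ excludes only the inputs on which A raises (AssertionError for both flags set, ValueError for a missing '/' in a rewriting mode), and B raises there too.
import Mathlib
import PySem

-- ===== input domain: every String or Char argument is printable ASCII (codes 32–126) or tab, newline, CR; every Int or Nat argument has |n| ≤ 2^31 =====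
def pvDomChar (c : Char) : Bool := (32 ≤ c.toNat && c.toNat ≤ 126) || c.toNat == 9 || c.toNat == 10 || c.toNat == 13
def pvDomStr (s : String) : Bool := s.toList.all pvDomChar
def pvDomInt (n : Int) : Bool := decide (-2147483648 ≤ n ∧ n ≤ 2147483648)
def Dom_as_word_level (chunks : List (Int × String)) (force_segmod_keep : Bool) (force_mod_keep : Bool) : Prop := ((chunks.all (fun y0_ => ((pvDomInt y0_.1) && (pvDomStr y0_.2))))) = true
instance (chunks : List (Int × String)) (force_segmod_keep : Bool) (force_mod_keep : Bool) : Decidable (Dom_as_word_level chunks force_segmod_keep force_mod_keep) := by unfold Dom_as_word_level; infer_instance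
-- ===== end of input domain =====

-- B partitions the sorted chunks into words first and rewrites tags in a second enumerate pass,
-- instead of A's single loop carrying the partially transformed current word (alternative decomposition, same cost).

-- s.rsplit('/', 1), ported by hand (exact for any string): (piece before the last '/',
-- some (piece after it)), or (s, none) when s contains no '/'.
def pyRsplitSlash (cs : List Char) : Option (List Char × List Char) :=
  match cs with
  | [] => none
  | c :: rest =>
    match pyRsplitSlash rest with
    | some (a, b) => some (c :: a, b)
    | none => if c = '/' then some ([], rest) else none

def pyRsplit1 (s : String) : String × Option String :=
  match pyRsplitSlash s.toList with
  | some (a, b) => (String.mk a, some (String.mk b))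
  | none => (s, none)

-- ===== PORT A =====
-- A's loop body; state = (words so far, current word of already-transformed (index, tag) pairs).
-- On inputs where the Python unpack 'morph, tag = …' raises ValueError (no '/'; outside Pre_)
-- the tag is read as "" here.
def awlStepA (force_segmod_keep : Bool) (force_mod_keep : Bool)
    (st : List (List (Int × String)) × List (Int × String)) (c : Int × String) :
    List (List (Int × String)) × List (Int × String) :=
  if (pyRsplit1 c.2).1 = "_" then
    if st.2.length > 0 then (st.1 ++ [st.2], ([] : List (Int × String))) else st
  else
    if force_segmod_keep then
      let morph := (pyRsplit1 c.2).1
      if st.2.length = 0 then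
        (st.1, st.2 ++ [((st.2.length : Int), morph ++ "/" ++ "B-KEEP")])
      else
        (st.1, st.2 ++ [((st.2.length : Int), morph ++ "/" ++ "I-KEEP")])
    else if force_mod_keep then
      let morph := (pyRsplit1 c.2).1
      let tag := ((pyRsplit1 c.2).2).getD ""
      let tag' :=
        if tag = "NOOP" then
          if st.2.length = 0 then "B-KEEP" else "I-KEEP"
        else if tag = "B-KEEP" ∨ tag = "I-KEEP" then
          tag
        else
          if st.2.length = 0 then "B-KEEP" else "I-KEEP"
      (st.1, st.2 ++ [((st.2.length : Int), morph ++ "/" ++ tag')])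
    else
      (st.1, st.2 ++ [((st.2.length : Int), c.2)])

def as_word_level (chunks : List (Int × String)) (force_segmod_keep : Bool) (force_mod_keep : Bool) : List (List (Int × String)) :=
  let fin := (PySem.List.sorted2 chunks (fun x => x.1) (fun x => x.2)).foldl
    (awlStepA force_segmod_keep force_mod_keep) ([], [])
  if fin.2.length > 0 then fin.1 ++ [fin.2] else fin.1

-- ===== PORT B =====
-- pass 1's loop body: partition into maximal runs of non-'_' chunks, untransformed.
def awlPartB (st : List (List (Int × String)) × List (Int × String)) (c : Int × String) :
    List (List (Int × String)) × List (Int × String) :=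
  if (pyRsplit1 c.2).1 = "_" then
    if st.2 ≠ [] then (st.1 ++ [st.2], ([] : List (Int × String))) else st
  else
    (st.1, st.2 ++ [c])

-- pass 2's tag rewrite at word position i (Source B's transform).
def awlTransform (force_segmod_keep : Bool) (force_mod_keep : Bool) (i : Int) (s : String) : String :=
  if force_segmod_keep then
    (pyRsplit1 s).1 ++ "/" ++ (if i = 0 then "B-KEEP" else "I-KEEP")
  else if force_mod_keep then
    let morph := (pyRsplit1 s).1
    let tag := ((pyRsplit1 s).2).getD ""
    if tag = "B-KEEP" ∨ tag = "I-KEEP" then morph ++ "/" ++ tag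
    else morph ++ "/" ++ (if i = 0 then "B-KEEP" else "I-KEEP")
  else s

-- Source B's inner comprehension: enumerate a word and rewrite each tag.
def awlTrans (force_segmod_keep : Bool) (force_mod_keep : Bool) (g : List (Int × String)) : List (Int × String) :=
  (PySem.List.enumerate g).map (fun p => (p.1, awlTransform force_segmod_keep force_mod_keep p.1 p.2.2))

def as_word_level_alt (chunks : List (Int × String)) (force_segmod_keep : Bool) (force_mod_keep : Bool) : List (List (Int × String)) :=
  let r := (PySem.List.sorted2 chunks (fun x => x.1) (fun x => x.2)).foldl awlPartB ([], [])
  let groups := if r.2 ≠ [] then r.1 ++ [r.2] else r.1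
  groups.map (awlTrans force_segmod_keep force_mod_keep)

-- ===== PRECONDITION & SPEC =====
-- Pre_ excludes exactly the inputs on which Python A raises: both flags set (AssertionError),
-- or a rewriting flag set while some non-separator chunk string has no '/' (ValueError on unpack).
def Pre_as_word_level (chunks : List (Int × String)) (force_segmod_keep : Bool) (force_mod_keep : Bool) : Prop :=
  (force_segmod_keep = true → force_mod_keep = false) ∧
  ((force_segmod_keep = true ∨ force_mod_keep = true) →
    ∀ p ∈ chunks, p.2 = "_" ∨ '/' ∈ p.2.toList)
instance (chunks : List (Int × String)) (force_segmod_keep : Bool) (force_mod_keep : Bool) : Decidable (Pre_as_word_level chunks force_segmod_keep force_mod_keep) := by unfold Pre_as_word_level; infer_instance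

def pvWitness_as_word_level : (List (Int × String)) × Bool × Bool :=
  ([(2, "_"), (0, "ab/NOOP"), (1, "c/MOD")], true, false)

def Spec_as_word_level (chunks : List (Int × String)) (force_segmod_keep : Bool) (force_mod_keep : Bool) (out : List (List (Int × String))) : Prop := out = as_word_level_alt chunks force_segmod_keep force_mod_keep
instance (chunks : List (Int × String)) (force_segmod_keep : Bool) (force_mod_keep : Bool) (out : List (List (Int × String))) : Decidable (Spec_as_word_level chunks force_segmod_keep force_mod_keep out) := by unfold Spec_as_word_level; infer_instance

-- ===== CLAIM (what is proved, stated in full; the proofs are below) =====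
def Claim_equal_as_word_level : Prop := ∀ (chunks : List (Int × String)) (force_segmod_keep : Bool) (force_mod_keep : Bool), Dom_as_word_level chunks force_segmod_keep force_mod_keep → Pre_as_word_level chunks force_segmod_keep force_mod_keep → Spec_as_word_level chunks force_segmod_keep force_mod_keep (as_word_level chunks force_segmod_keep force_mod_keep)

-- ===== LEMMAS AND PROOFS =====

lemma awlTrans_nil (fs fm : Bool) : awlTrans fs fm [] = [] := rfl

lemma awlTrans_length (fs fm : Bool) (g : List (Int × String)) :
    (awlTrans fs fm g).length = g.length := by
  simp [awlTrans, PySem.List.length_enumerate]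

lemma awlTrans_append (fs fm : Bool) (g : List (Int × String)) (c : Int × String) :
    awlTrans fs fm (g ++ [c]) =
      awlTrans fs fm g ++ [((g.length : Int), awlTransform fs fm (g.length : Int) c.2)] := by
  simp [awlTrans, PySem.List.enumerate_append, PySem.List.enumerate_cons]

lemma awlTagEqB (tag : String) :
    (if tag = "NOOP" then "B-KEEP"
     else if tag = "B-KEEP" ∨ tag = "I-KEEP" then tag else "B-KEEP")
    = (if tag = "B-KEEP" ∨ tag = "I-KEEP" then tag else "B-KEEP") := by
  by_cases hn : tag = "NOOP"
  · subst hn; simp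
  · simp [hn]

lemma awlTagEqI (tag : String) :
    (if tag = "NOOP" then "I-KEEP"
     else if tag = "B-KEEP" ∨ tag = "I-KEEP" then tag else "I-KEEP")
    = (if tag = "B-KEEP" ∨ tag = "I-KEEP" then tag else "I-KEEP") := by
  by_cases hn : tag = "NOOP"
  · subst hn; simp
  · simp [hn]

lemma awlTrans_singleton (fs fm : Bool) (c : Int × String) :
    awlTrans fs fm [c] = [(0, awlTransform fs fm 0 c.2)] := by
  simp [awlTrans, PySem.List.enumerate_cons, PySem.List.enumerate_nil]

-- one loop step: A's transform-as-you-go step mirrors B's partition step through awlTrans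
lemma awl_step (fs fm : Bool) (gs : List (List (Int × String))) (g : List (Int × String))
    (c : Int × String) :
    awlStepA fs fm (gs.map (awlTrans fs fm), awlTrans fs fm g) c =
      ((awlPartB (gs, g) c).1.map (awlTrans fs fm), awlTrans fs fm (awlPartB (gs, g) c).2) := by
  by_cases hsep : (pyRsplit1 c.2).1 = "_"
  · rcases eq_or_ne g [] with hg | hg
    · subst hg; simp [awlStepA, awlPartB, hsep, awlTrans_nil]
    · have hlen : 0 < (awlTrans fs fm g).length := by
        rw [awlTrans_length]; exact List.length_pos_iff.mpr hg
      simp [awlStepA, awlPartB, hsep, hg, hlen, awlTrans_nil]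
  · have hlen := awlTrans_length fs fm g
    have happ := awlTrans_append fs fm g c
    by_cases hg : g = []
    · subst hg
      cases fs <;> cases fm <;>
        simp [awlStepA, awlPartB, awlTransform, awlTagEqB, awlTagEqI, hsep,
          awlTrans_nil, awlTrans_singleton] <;> (try (split <;> rfl))
    · have h0 : ¬ (g.length = 0) := fun h => hg (List.length_eq_zero_iff.mp h)
      have hzi : ¬ ((g.length : Int) = 0) := by
        simpa [List.length_eq_zero_iff] using hg
      have htl : ¬ ((awlTrans fs fm g).length = 0) := by rw [hlen]; exact h0
      have htn : awlTrans fs fm g ≠ [] := fun h => htl (by rw [h]; rfl)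
      cases fs <;> cases fm <;>
        simp [awlStepA, awlPartB, awlTransform, awlTagEqB, awlTagEqI, hsep, happ,
          hlen, h0, hzi, htl, htn] <;> (try (split <;> rfl))

-- the invariant pushed through the whole loop
lemma awl_loop (fs fm : Bool) (l : List (Int × String)) :
    ∀ (gs : List (List (Int × String))) (g : List (Int × String)),
    (fun fin => if fin.2.length > 0 then fin.1 ++ [fin.2] else fin.1)
        (l.foldl (awlStepA fs fm) (gs.map (awlTrans fs fm), awlTrans fs fm g)) =
      ((fun r => if r.2 ≠ [] then r.1 ++ [r.2] else r.1)
        (l.foldl awlPartB (gs, g))).map (awlTrans fs fm) := by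
  induction l with
  | nil =>
    intro gs g
    rcases eq_or_ne g [] with hg | hg
    · subst hg; simp [awlTrans_nil]
    · have hlen : 0 < (awlTrans fs fm g).length := by
        rw [awlTrans_length]; exact List.length_pos_iff.mpr hg
      simp [hg, hlen]
  | cons c l ih =>
    intro gs g
    simp only [List.foldl_cons, awl_step fs fm gs g c]
    exact ih (awlPartB (gs, g) c).1 (awlPartB (gs, g) c).2

-- ===== VERDICT (by name: the statement is the Claim_ definition above) =====
theorem as_word_level_spec : Claim_equal_as_word_level := by
  intro chunks fs fm _ _
  unfold Spec_as_word_level as_word_level as_word_level_alt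
  have h := awl_loop fs fm (PySem.List.sorted2 chunks (fun x => x.1) (fun x => x.2)) [] []
  simpa [awlTrans_nil] using h
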